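-- pv_equiv track=rewrite | github.com/PolloRollo/ProjectEuler | problems.py | problem_169
-- ===== SOURCE A (Python) =====
-- def problem_169(n=10**25):
--     """
--     Return the number of partitions of n using only integer powers of 2, each no more than twice.
--     """
--     binary = bin(n)[2:]
--     ones = []
--     zero_gaps = 0
--     zero = True
--     for i in range(1, len(binary)+1):
--         if binary[-i] == '1':
--             ones.append(i)
--             zero = True
--         elif zero:
--             zero = False
--             zero_gaps += 1
--     soln = [1, 1]
--     for i in range(len(ones)):
--         gap = 1
--         if i == 0:
--             gap *= ones[i]
--         else:
--             gap *= ones[i] - ones[i-1]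
--         soln.append(gap*soln[-1] + (soln[-1]-soln[-2]))
--     return soln[-1]
-- ===== SOURCE B (Python) =====
-- def problem_169(n=10**25):
--     # Classic PE169 halving recurrence, scanned over the binary digits of n
--     # from most significant to least, keeping the pair (f(m), f(m-1)) for the
--     # prefix value m built so far.  O(log n) pair updates, no DP list.
--     a, b = 1, 0  # (f(0), f(-1))
--     for i in range(n.bit_length() - 1, -1, -1):
--         if n // 2**i % 2 == 1:
--             b = a + b
--         else:
--             a = a + b
--     return a
-- ===== Notes on version B (the rewrite author's own statement) =====
-- stated objective: alternative
-- what changed: Replaces A's two-pass gap extraction (bin-string scan collecting 1-positions, then a DP list over gaps) with a single MSB-to-LSB scan over the bits of n maintaining the pair (f(m), f(m-1)) of the halving recurrence f(2m)=f(m)+f(m-1), f(2m+1)=f(m).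
-- outside the precondition, e.g. on problem_169(-5): A returns 2, B returns 1
import Mathlib
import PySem

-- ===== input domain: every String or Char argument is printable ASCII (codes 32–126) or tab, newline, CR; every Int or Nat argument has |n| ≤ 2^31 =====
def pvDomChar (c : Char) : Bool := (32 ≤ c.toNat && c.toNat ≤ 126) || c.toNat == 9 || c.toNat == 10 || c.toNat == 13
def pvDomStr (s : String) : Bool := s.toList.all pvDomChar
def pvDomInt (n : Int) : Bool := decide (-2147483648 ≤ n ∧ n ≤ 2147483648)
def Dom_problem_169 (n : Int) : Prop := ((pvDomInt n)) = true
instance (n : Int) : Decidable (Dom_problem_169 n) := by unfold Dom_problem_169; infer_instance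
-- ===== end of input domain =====

-- B replaces A's two-pass gap DP (bin-string scan + list of gap recurrences) with a single
-- MSB→LSB bit scan maintaining the pair (f(m), f(m-1)) of the halving recurrence; same cost class.

-- ===== PORT A =====
-- first loop of A: scan binary[-i] collecting 1-positions (state: ones, zero_gaps, zero)
def loopABody (L : List Char) (st : List Int × Int × Bool) (i : Int) : List Int × Int × Bool :=
  match PySem.List.pyGet? L (-i) with
  | some c =>
      if c = '1' then (st.1 ++ [i], st.2.1, true)
      else if st.2.2 then (st.1, st.2.1 + 1, false)
      else st
  | none => st  -- unreachable: the loop index satisfies 1 ≤ i ≤ len(binary)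

-- second loop of A: soln.append(gap*soln[-1] + (soln[-1]-soln[-2]))
def solnBody (ones : List Int) (soln : List Int) (i : Int) : List Int :=
  let gap : Int :=
    if i == 0 then 1 * PySem.List.pyGetD ones i 0
    else 1 * (PySem.List.pyGetD ones i 0 - PySem.List.pyGetD ones (i - 1) 0)
  soln ++ [gap * PySem.List.pyGetD soln (-1) 0 +
    (PySem.List.pyGetD soln (-1) 0 - PySem.List.pyGetD soln (-2) 0)]

def problem_169 (n : Int) : Int :=
  let binary := PySem.Str.slice (PySem.Int.pyBin n) (some 2) none   -- bin(n)[2:]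
  let L := binary.toList
  let st := (PySem.List.pyRange 1 (PySem.Str.len binary + 1) 1).foldl (loopABody L) ([], 0, true)
  let ones := st.1
  let soln := (PySem.List.pyRange 0 (ones.length : Int) 1).foldl (solnBody ones) [1, 1]
  PySem.List.pyGetD soln (-1) 0

-- ===== PORT B =====
-- loop body of B: one bit, pair update   (i ≥ 0 along range(n.bit_length()-1, -1, -1), so 2**i is 2 ^ i.toNat)
def altBody (n : Int) (ab : Int × Int) (i : Int) : Int × Int :=
  if PySem.Int.mod (PySem.Int.floordiv n (2 ^ i.toNat)) 2 == 1 then (ab.1, ab.1 + ab.2)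
  else (ab.1 + ab.2, ab.2)

def problem_169_alt (n : Int) : Int :=
  ((PySem.List.pyRange ((PySem.Int.bitLength n : Int) - 1) (-1) (-1)).foldl (altBody n) (1, 0)).1

-- ===== PRECONDITION & SPEC =====
-- Pre_ excludes negative n, on which A returns an accident of string slicing: bin(n)[2:] leaves
-- 'b'+digits of |n|, so A's answer there is meaningless for the counting task; B differs there.
def Pre_problem_169 (n : Int) : Prop := 0 ≤ n
instance (n : Int) : Decidable (Pre_problem_169 n) := by unfold Pre_problem_169; infer_instance
def pvWitness_problem_169 : Int := (10)
def Spec_problem_169 (n : Int) (out : Int) : Prop := out = problem_169_alt n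
instance (n : Int) (out : Int) : Decidable (Spec_problem_169 n out) := by unfold Spec_problem_169; infer_instance

-- ===== CLAIM (what is proved, stated in full; the proofs are below) =====
def Claim_equal_problem_169 : Prop := ∀ (n : Int), Dom_problem_169 n → Pre_problem_169 n → Spec_problem_169 n (problem_169 n)

-- ===== LEMMAS AND PROOFS =====

def fN (n : Nat) : Int :=
  if n = 0 then 1
  else if n % 2 = 1 then fN (n / 2)
  else fN (n / 2) + fN (n / 2 - 1)
termination_by n
decreasing_by all_goals omega
def fP (m : Nat) : Int := if m = 0 then 0 else fN (m - 1)

lemma fN_zero : fN 0 = 1 := by rw [fN]; norm_num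
lemma fN_even (k : Nat) : fN (2 * k) = fN k + fP k := by
  rcases Nat.eq_zero_or_pos k with h | h
  · subst h; simp [fN_zero, fP]
  · rw [fN]
    have h1 : ¬ (2 * k = 0) := by omega
    have h2 : ¬ (2 * k % 2 = 1) := by omega
    have h3 : 2 * k / 2 = k := by omega
    have h4 : ¬ (k = 0) := by omega
    simp [h1, h3, fP, h4]
lemma fN_odd (k : Nat) : fN (2 * k + 1) = fN k := by
  rw [fN]
  have h2 : (2 * k + 1) % 2 = 1 := by omega
  have h3 : (2 * k + 1) / 2 = k := by omega
  simp [h2, h3]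
lemma fP_even (k : Nat) : fP (2 * k) = fP k := by
  rcases Nat.eq_zero_or_pos k with h | h
  · subst h; simp [fP]
  · have h1 : 2 * k - 1 = 2 * (k - 1) + 1 := by omega
    have h2 : ¬ (2 * k = 0) := by omega
    unfold fP
    simp only [h2, if_false, h1, fN_odd]
    have h3 : ¬ (k = 0) := by omega
    simp [h3]
lemma fP_odd (k : Nat) : fP (2 * k + 1) = fN k + fP k := by
  unfold fP
  have h1 : ¬ (2 * k + 1 = 0) := by omega
  simp only [h1, if_false, Nat.add_sub_cancel, fN_even]
  rfl
lemma fN_one : fN 1 = 1 := by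
  have := fN_odd 0; simpa [fN_zero] using this
lemma fP_one : fP 1 = 1 := by simp [fP, fN_zero]
lemma fP_two_pow (e : Nat) : fP (2 ^ e) = 1 := by
  induction e with
  | zero => simp [fP_one]
  | succ e ih =>
    have h : (2 : Nat) ^ (e + 1) = 2 * 2 ^ e := by ring
    rw [h, fP_even]; exact ih

lemma fN_two_pow (e : Nat) : fN (2 ^ e) = (e : Int) + 1 := by
  induction e with
  | zero => simp [fN_one]
  | succ e ih =>
    have h : (2 : Nat) ^ (e + 1) = 2 * 2 ^ e := by ring
    rw [h, fN_even, ih, fP_two_pow]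
    push_cast; ring

lemma fK (g : Nat) (hg : 1 ≤ g) : ∀ (a : Nat), ∀ (m : Nat), 2 ^ a ≤ m → m < 2 ^ (a + 1) →
    fN (m + 2 ^ (a + g)) = ((g : Int) + 1) * fN m - fN (m - 2 ^ a) ∧
    fP (m + 2 ^ (a + g)) = ((g : Int) + 1) * fP m - fP (m - 2 ^ a) := by
  intro a
  induction a with
  | zero =>
    intro m hm1 hm2
    have hm : m = 1 := by simpa using (by omega : m = 1)
    subst hm
    have h2 : (2:Nat) ^ (0 + g) = 2 * 2 ^ (g - 1) := by
      rw [zero_add]; cases g with | zero => omega | succ g' => simp [pow_succ]; ring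
    have h0 : (1 : Nat) - 2 ^ 0 = 0 := by norm_num
    have hc : ((g - 1 : Nat) : Int) = (g : Int) - 1 := by omega
    constructor
    · rw [show 1 + 2 ^ (0 + g) = 2 * 2 ^ (g - 1) + 1 by omega, fN_odd, fN_two_pow, fN_one, h0,
        fN_zero, hc]
      ring
    · rw [show 1 + 2 ^ (0 + g) = 2 * 2 ^ (g - 1) + 1 by omega, fP_odd, fN_two_pow, fP_two_pow,
        fP_one, h0, hc]
      simp [fP]
  | succ a ih =>
    intro m hm1 hm2
    have hpow : (2:Nat) ^ (a + 1) = 2 * 2 ^ a := by ring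
    have hpow2 : (2:Nat) ^ (a + 1 + 1) = 2 * 2 ^ (a + 1) := by ring
    have hpowg : (2:Nat) ^ (a + 1 + g) = 2 * 2 ^ (a + g) := by ring
    set m' := m / 2 with hm'
    have hm'1 : 2 ^ a ≤ m' := by omega
    have hm'2 : m' < 2 ^ (a + 1) := by omega
    obtain ⟨K1, K2⟩ := ih m' hm'1 hm'2
    have hsub : m - 2 ^ (a + 1) = 2 * (m' - 2 ^ a) + m % 2 := by omega
    have hsplit : m = 2 * m' + m % 2 := by omega
    rcases Nat.mod_two_eq_zero_or_one m with hpar | hpar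
    · -- m even
      have e1 : m + 2 ^ (a + 1 + g) = 2 * (m' + 2 ^ (a + g)) := by omega
      have e2 : m = 2 * m' := by omega
      have e3 : m - 2 ^ (a + 1) = 2 * (m' - 2 ^ a) := by omega
      constructor
      · rw [e1, fN_even, K1, K2, e3, fN_even, e2, fN_even]; ring
      · rw [e1, fP_even, K2, e3, fP_even, e2, fP_even]
    · -- m odd
      have e1 : m + 2 ^ (a + 1 + g) = 2 * (m' + 2 ^ (a + g)) + 1 := by omega
      have e2 : m = 2 * m' + 1 := by omega
      have e3 : m - 2 ^ (a + 1) = 2 * (m' - 2 ^ a) + 1 := by omega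
      constructor
      · rw [e1, fN_odd, K1, e3, fN_odd, e2, fN_odd]
      · rw [e1, fP_odd, K1, K2, e3, fP_odd, e2, fP_odd]; ring

def goA : List Int → Int × Int → Int → Int
  | [], (s, _), _ => s
  | q :: rest, (s, t), p => goA rest ((q - p) * s + (s - t), s) q

def posOnes (h : Nat) (j : Nat) : List Int :=
  if h = 0 then [] else (if h % 2 = 1 then [(j : Int)] else []) ++ posOnes (h / 2) (j + 1)
termination_by h
decreasing_by omega

lemma goA_posOnes (h : Nat) : ∀ (j' a m : Nat), a + 1 ≤ j' → 2 ^ a ≤ m → m < 2 ^ (a + 1) →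
    goA (posOnes h (j' + 1)) (fN m, fN (m - 2 ^ a)) ((a : Int) + 1) = fN (h * 2 ^ j' + m) := by
  induction h using Nat.strong_induction_on with
  | _ h IH =>
    intro j' a m hj ha1 ha2
    rcases Nat.eq_zero_or_pos h with h0 | hpos
    · subst h0; rw [posOnes]; simp [goA]
    rw [posOnes]
    have hne : ¬ (h = 0) := by omega
    rcases Nat.mod_two_eq_zero_or_one h with hpar | hpar
    · -- h even: no one at position j'+1
      simp only [hne, if_false, hpar]
      norm_num
      have heq : h / 2 * 2 ^ (j' + 1) = h * 2 ^ j' := by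
        have h2 : h = 2 * (h / 2) := by omega
        calc h / 2 * 2 ^ (j' + 1) = 2 * (h / 2) * 2 ^ j' := by rw [pow_succ]; ring
        _ = h * 2 ^ j' := by rw [← h2]
      have := IH (h / 2) (by omega) (j' + 1) a m (by omega) ha1 ha2
      rw [this, heq]
    · -- h odd: one at position j'+1
      simp only [hne, if_false, hpar]
      norm_num [goA]
      set g : Nat := j' - a with hgdef
      have hg1 : 1 ≤ g := by omega
      have hja : a + g = j' := by omega
      obtain ⟨K1, _⟩ := fK g hg1 a m ha1 ha2
      have hcast : ((g : Int)) = (j' : Int) - a := by omega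
      have hpair : ((j' : Int) - (a : Int)) * fN m + (fN m - fN (m - 2 ^ a))
          = fN (m + 2 ^ j') := by
        rw [← hja, K1]
        push_cast
        ring
      rw [hpair]
      have hm'1 : 2 ^ j' ≤ m + 2 ^ j' := by omega
      have hm'2 : m + 2 ^ j' < 2 ^ (j' + 1) := by
        have : (2:Nat) ^ (a + 1) ≤ 2 ^ j' := Nat.pow_le_pow_right (by norm_num) hj
        have : m < 2 ^ j' := by omega
        rw [pow_succ]; omega
      have hIH := IH (h / 2) (by omega) (j' + 1) j' (m + 2 ^ j') (by omega) hm'1 hm'2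
      have hsub : m + 2 ^ j' - 2 ^ j' = m := by omega
      rw [hsub] at hIH
      rw [hIH]
      congr 1
      have h2 : h = 2 * (h / 2) + 1 := by omega
      calc h / 2 * 2 ^ (j' + 1) + (m + 2 ^ j') = (2 * (h / 2) + 1) * 2 ^ j' + m := by
            rw [pow_succ]; ring
      _ = h * 2 ^ j' + m := by rw [← h2]

lemma goA_posOnes0 (h : Nat) : ∀ (j' : Nat),
    goA (posOnes h (j' + 1)) (1, 1) 0 = fN (h * 2 ^ j') := by
  induction h using Nat.strong_induction_on with
  | _ h IH =>
    intro j'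
    rcases Nat.eq_zero_or_pos h with h0 | hpos
    · subst h0; rw [posOnes]; simp [goA, fN_zero]
    rw [posOnes]
    have hne : ¬ (h = 0) := by omega
    rcases Nat.mod_two_eq_zero_or_one h with hpar | hpar
    · simp only [hne, if_false, hpar]
      norm_num
      have heq : h / 2 * 2 ^ (j' + 1) = h * 2 ^ j' := by
        have h2 : h = 2 * (h / 2) := by omega
        calc h / 2 * 2 ^ (j' + 1) = 2 * (h / 2) * 2 ^ j' := by rw [pow_succ]; ring
        _ = h * 2 ^ j' := by rw [← h2]
      rw [IH (h / 2) (by omega) (j' + 1), heq]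
    · simp only [hne, if_false, hpar]
      norm_num [goA]
      have hIH := goA_posOnes (h / 2) (j' + 1) j' (2 ^ j') (by omega) (le_refl _)
        (by have := Nat.two_pow_pos j'; rw [pow_succ]; omega)
      have hsub : (2:Nat) ^ j' - 2 ^ j' = 0 := by omega
      rw [hsub, fN_zero, fN_two_pow] at hIH
      rw [hIH]
      congr 1
      have h2 : h = 2 * (h / 2) + 1 := by omega
      calc h / 2 * 2 ^ (j' + 1) + 2 ^ j' = (2 * (h / 2) + 1) * 2 ^ j' := by rw [pow_succ]; ring
      _ = h * 2 ^ j' := by rw [← h2]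

def binChars (m : Nat) : List Char :=
  if m < 2 then [if m = 1 then '1' else '0']
  else binChars (m / 2) ++ [if m % 2 = 1 then '1' else '0']
termination_by m
decreasing_by omega

def lsbChars (m : Nat) : List Char :=
  if m < 2 then [if m = 1 then '1' else '0']
  else (if m % 2 = 1 then '1' else '0') :: lsbChars (m / 2)
termination_by m
decreasing_by omega

lemma toDigitsCore_two (fuel : Nat) : ∀ (m : Nat) (ds : List Char), m < fuel →
    Nat.toDigitsCore 2 fuel m ds = binChars m ++ ds := by
  induction fuel with
  | zero => intro m ds h; omega
  | succ f ih =>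
    intro m ds h
    rw [Nat.toDigitsCore]
    by_cases h0 : m / 2 = 0
    · simp only [h0, if_true]
      rw [binChars]
      have hm2 : m < 2 := by omega
      simp only [hm2, if_true]
      have : (m % 2).digitChar = (if m = 1 then '1' else '0') := by
        interval_cases m <;> rfl
      rw [this]; rfl
    · simp only [h0, if_false]
      rw [ih (m / 2) _ (by omega)]
      conv_rhs => rw [binChars]
      have hm2 : ¬ (m < 2) := by omega
      simp only [hm2, if_false]
      have : (m % 2).digitChar = (if m % 2 = 1 then '1' else '0') := by
        rcases Nat.mod_two_eq_zero_or_one m with hp | hp <;> rw [hp] <;> rfl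
      rw [this]
      simp

lemma toDigits_two (m : Nat) : Nat.toDigits 2 m = binChars m := by
  have := toDigitsCore_two (m + 1) m [] (by omega)
  simpa [Nat.toDigits] using this

lemma binChars_reverse (m : Nat) : (binChars m).reverse = lsbChars m := by
  induction m using Nat.strong_induction_on with
  | _ m ih =>
    rw [binChars, lsbChars]
    by_cases h : m < 2
    · simp [h]
    · simp only [h, if_false, List.reverse_append, List.reverse_cons, List.reverse_nil,
        List.nil_append, List.singleton_append]
      rw [ih (m / 2) (by omega)]

def onesPosL : List Char → Int → List Int
  | [], _ => []
  | c :: r, i => if c = '1' then i :: onesPosL r (i + 1) else onesPosL r (i + 1)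

lemma onesPosL_lsb (m : Nat) : ∀ (j : Nat), onesPosL (lsbChars m) (j : Int) = posOnes m j := by
  induction m using Nat.strong_induction_on with
  | _ m ih =>
    intro j
    rw [lsbChars, posOnes]
    by_cases h : m < 2
    · interval_cases m
      · simp [onesPosL]
      · norm_num [onesPosL]
        rw [posOnes]; simp
    · have hne : ¬ (m = 0) := by omega
      simp only [h, if_false, hne]
      have hcast : ((j : Int) + 1) = ((j + 1 : Nat) : Int) := by push_cast; ring
      rcases Nat.mod_two_eq_zero_or_one m with hp | hp
      · simp only [hp]
        norm_num [onesPosL]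
        rw [hcast, ih (m / 2) (by omega) (j + 1), if_neg (by decide)]
      · simp only [hp]
        norm_num [onesPosL]
        rw [hcast, ih (m / 2) (by omega) (j + 1)]

def spec1 : List Char → Int → (List Int × Int × Bool) → (List Int × Int × Bool)
  | [], _, st => st
  | c :: r, i, st =>
    if c = '1' then spec1 r (i + 1) (st.1 ++ [i], st.2.1, true)
    else if st.2.2 then spec1 r (i + 1) (st.1, st.2.1 + 1, false)
    else spec1 r (i + 1) st

lemma spec1_fst : ∀ (r : List Char) (i : Int) (st : List Int × Int × Bool),
    (spec1 r i st).1 = st.1 ++ onesPosL r i := by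
  intro r
  induction r with
  | nil => intro i st; simp [spec1, onesPosL]
  | cons c r ih =>
    intro i st
    rw [spec1, onesPosL]
    by_cases hc : c = '1'
    · simp only [hc, if_true, ih]
      simp
    · by_cases hz : st.2.2 <;> simp [hc, hz, ih]

lemma loop1_eq (L : List Char) : ∀ (k : Nat) (st : List Int × Int × Bool), k ≤ L.length →
    (PySem.List.pyRange ((L.length : Int) - k + 1) ((L.length : Int) + 1) 1).foldl (loopABody L) st
    = spec1 (L.reverse.drop (L.length - k)) ((L.length : Int) - k + 1) st := by
  intro k
  induction k with
  | zero =>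
    intro st _
    rw [PySem.List.pyRange_one_eq_nil (by omega)]
    rw [List.drop_of_length_le (by simp)]
    simp [spec1]
  | succ k ih =>
    intro st hk
    simp only [Nat.cast_add, Nat.cast_one]
    obtain ⟨d, hddef⟩ : ∃ d, L.length - (k + 1) = d := ⟨_, rfl⟩
    rw [hddef]
    have hd : d < L.reverse.length := by simp; omega
    rw [List.drop_eq_getElem_cons hd]
    have hgr : L.reverse[d] = L[k]'(by omega) := by
      rw [List.getElem_reverse]
      have he : L.length - 1 - d = k := by omega
      simp only [he]
    rw [PySem.List.pyRange_one_cons (by omega), List.foldl_cons]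
    have hidx : (L.length : Int) - (k + 1) + 1 = ((d + 1 : Nat) : Int) := by omega
    have hget : PySem.List.pyGet? L (-((L.length : Int) - (k + 1) + 1)) = some (L[k]'(by omega)) := by
      rw [hidx, PySem.List.pyGet?_neg_natCast L (d + 1) (by omega) (by omega)]
      rw [List.getElem?_eq_getElem (by omega)]
      have he2 : L.length - (d + 1) = k := by omega
      simp only [he2]
    have hbody : loopABody L st ((L.length : Int) - (k + 1) + 1)
        = (if L[k]'(by omega) = '1' then (st.1 ++ [(L.length : Int) - (k + 1) + 1], st.2.1, true)
           else if st.2.2 then (st.1, st.2.1 + 1, false) else st) := by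
      rw [loopABody, hget]
    rw [hbody, spec1, hgr]
    have harith : (L.length : Int) - (k + 1) + 1 + 1 = (L.length : Int) - k + 1 := by omega
    have hdidx : d + 1 = L.length - k := by omega
    rw [harith, hdidx]
    split_ifs <;> exact ih _ (by omega)

lemma pyGetD_last2 (pre : List Int) (t s : Int) :
    PySem.List.pyGetD (pre ++ [t, s]) (-1) 0 = s ∧ PySem.List.pyGetD (pre ++ [t, s]) (-2) 0 = t := by
  constructor
  · rw [show pre ++ [t, s] = (pre ++ [t]) ++ [s] by simp]
    exact PySem.List.pyGetD_neg_one_append_singleton _ _ _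
  · rw [PySem.List.pyGetD_neg_ofNat _ 2 0 (by omega) (by simp)]
    have h : (pre ++ [t, s]).length - 2 = pre.length := by simp
    simp only [h]
    rw [List.getElem_append_right (le_refl _)]
    simp

lemma loop2_eq (ones : List Int) : ∀ (k : Nat) (pre : List Int) (t s : Int), k ≤ ones.length →
    PySem.List.pyGetD
      ((PySem.List.pyRange ((ones.length : Int) - k) (ones.length : Int) 1).foldl
        (solnBody ones) (pre ++ [t, s])) (-1) 0
    = goA (ones.drop (ones.length - k)) (s, t)
        (if ones.length - k = 0 then 0 else PySem.List.pyGetD ones ((ones.length : Int) - k - 1) 0) := by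
  intro k
  induction k with
  | zero =>
    intro pre t s _
    rw [PySem.List.pyRange_one_eq_nil (by omega)]
    rw [List.drop_of_length_le (by omega)]
    simp only [List.foldl_nil, goA]
    exact (pyGetD_last2 pre t s).1
  | succ k ih =>
    intro pre t s hk
    simp only [Nat.cast_add, Nat.cast_one]
    obtain ⟨j, hjdef⟩ : ∃ j, ones.length - (k + 1) = j := ⟨_, rfl⟩
    have hj : j < ones.length := by omega
    rw [hjdef, List.drop_eq_getElem_cons hj]
    rw [PySem.List.pyRange_one_cons (by omega), List.foldl_cons]
    have hidx : (ones.length : Int) - (k + 1) = ((j : Nat) : Int) := by omega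
    have hq : PySem.List.pyGetD ones ((ones.length : Int) - (k + 1)) 0 = ones[j]'hj := by
      rw [hidx]; exact PySem.List.pyGetD_ofNat ones j 0 hj
    obtain ⟨hlast, hlast2⟩ := pyGetD_last2 pre t s
    have hgap : (if ((ones.length : Int) - (k + 1)) == 0
          then 1 * PySem.List.pyGetD ones ((ones.length : Int) - (k + 1)) 0
          else 1 * (PySem.List.pyGetD ones ((ones.length : Int) - (k + 1)) 0
                    - PySem.List.pyGetD ones ((ones.length : Int) - (k + 1) - 1) 0))
        = ones[j]'hj - (if j = 0 then 0
                        else PySem.List.pyGetD ones ((ones.length : Int) - (k + 1) - 1) 0) := by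
      by_cases h0 : j = 0
      · have hb : (((ones.length : Int) - (k + 1)) == 0) = true := by
          simp only [beq_iff_eq]; omega
        simp [hb, hq, h0]
      · have hb : (((ones.length : Int) - (k + 1)) == 0) = false := by
          simp only [beq_eq_false_iff_ne, ne_eq]; omega
        simp [hb, hq, h0]
    have hbody : solnBody ones (pre ++ [t, s]) ((ones.length : Int) - (k + 1))
        = (pre ++ [t]) ++ [s, (ones[j]'hj - (if j = 0 then 0
            else PySem.List.pyGetD ones ((ones.length : Int) - (k + 1) - 1) 0)) * s + (s - t)] := by
      simp only [solnBody, hlast, hlast2, hgap]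
      simp
    rw [hbody]
    have harith : (ones.length : Int) - (k + 1) + 1 = (ones.length : Int) - k := by omega
    rw [harith, ih (pre ++ [t]) _ _ (by omega)]
    have hd1 : ones.length - k = j + 1 := by omega
    simp only [hd1, Nat.succ_ne_zero, if_false, goA]
    congr 2
    rw [show (ones.length : Int) - k - 1 = ((j : Nat) : Int) by omega]
    exact PySem.List.pyGetD_ofNat ones j 0 hj

lemma pyRange_neg_one_cons {a b : Int} (h : b < a) :
    PySem.List.pyRange a b (-1) = a :: PySem.List.pyRange (a - 1) b (-1) := by
  rw [PySem.List.pyRange_neg_one, PySem.List.pyRange_neg_one]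
  have h1 : (a - b).toNat = (a - 1 - b).toNat + 1 := by omega
  rw [h1, List.range_succ_eq_map]
  simp only [List.map_cons, List.map_map]
  congr 1
  · norm_num
  · apply List.map_congr_left
    intro x _
    simp [Function.comp]
    omega

lemma loopB_eq (n' : Nat) : ∀ (j : Nat),
    (PySem.List.pyRange ((j : Int) - 1) (-1) (-1)).foldl (altBody (n' : Int))
      (fN (n' / 2 ^ j), fP (n' / 2 ^ j)) = (fN n', fP n') := by
  intro j
  induction j with
  | zero =>
    rw [PySem.List.pyRange_neg_one]
    norm_num
  | succ j ih =>
    have hc : ((j + 1 : Nat) : Int) - 1 = (j : Nat) := by push_cast; ring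
    rw [hc, pyRange_neg_one_cons (by omega), List.foldl_cons]
    have htn : ((j : Nat) : Int).toNat = j := by omega
    have hpow : ((2 : Int) ^ j) = ((2 ^ j : Nat) : Int) := by push_cast; ring
    have hfd : PySem.Int.floordiv (n' : Int) ((2 : Int) ^ j) = ((n' / 2 ^ j : Nat) : Int) := by
      rw [hpow]; exact PySem.Int.floordiv_natCast n' (2 ^ j)
    have hmod : PySem.Int.mod ((n' / 2 ^ j : Nat) : Int) 2 = ((n' / 2 ^ j % 2 : Nat) : Int) := by
      exact_mod_cast PySem.Int.mod_natCast (n' / 2 ^ j) 2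
    have hsplit : n' / 2 ^ j = 2 * (n' / 2 ^ (j + 1)) + (n' / 2 ^ j) % 2 := by
      have : n' / 2 ^ j / 2 = n' / 2 ^ (j + 1) := by
        rw [Nat.div_div_eq_div_mul, pow_succ]
      omega
    have hbody : altBody (n' : Int) (fN (n' / 2 ^ (j + 1)), fP (n' / 2 ^ (j + 1))) ((j : Nat) : Int)
        = (fN (n' / 2 ^ j), fP (n' / 2 ^ j)) := by
      rw [altBody]
      simp only [htn, hfd, hmod]
      rcases Nat.mod_two_eq_zero_or_one (n' / 2 ^ j) with hp | hp
      · have hb : ((((n' / 2 ^ j % 2 : Nat) : Int)) == 1) = false := by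
          rw [hp]; decide
        simp only [hb, Bool.false_eq_true, if_false]
        have he : n' / 2 ^ j = 2 * (n' / 2 ^ (j + 1)) := by omega
        rw [he, fN_even, fP_even]
      · have hb : ((((n' / 2 ^ j % 2 : Nat) : Int)) == 1) = true := by
          rw [hp]; decide
        simp only [hb, if_true]
        have he : n' / 2 ^ j = 2 * (n' / 2 ^ (j + 1)) + 1 := by omega
        rw [he, fN_odd, fP_odd]
    rw [hbody, ih]

lemma binary_toList (n' : Nat) :
    (PySem.Str.slice (PySem.Int.pyBin n') (some 2) none).toList = binChars n' := by
  rw [PySem.Str.slice]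
  rw [String.toList_ofList]
  rw [PySem.Int.toList_pyBin]
  rw [PySem.Chars.slice, PySem.List.slice_from _ (by norm_num : (0:Int) ≤ 2)]
  rw [PySem.Int.toBinChars0b]
  have h : ¬ ((n' : Int) < 0) := by omega
  simp only [h, if_false]
  have h2 : ((n' : Int)).toNat = n' := by omega
  rw [h2, toDigits_two]
  rfl

lemma a_eq_fN (n' : Nat) : problem_169 (n' : Int) = fN n' := by
  unfold problem_169
  simp only [binary_toList, PySem.Str.len_eq, binary_toList]
  set L := binChars n' with hL
  -- first loop
  have h1 := loop1_eq L L.length ([], 0, true) (le_refl _)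
  have hs : ((L.length : Int)) - L.length + 1 = 1 := by omega
  rw [hs, Nat.sub_self, List.drop_zero] at h1
  rw [h1, spec1_fst]
  simp only [List.nil_append]
  rw [hL, binChars_reverse]
  have hol : onesPosL (lsbChars n') 1 = posOnes n' 1 := by exact_mod_cast onesPosL_lsb n' 1
  rw [hol]
  set ones := posOnes n' 1 with hones
  -- second loop
  have h2 := loop2_eq ones ones.length [] 1 1 (le_refl _)
  simp only [List.nil_append, Nat.sub_self] at h2
  have hz : ((ones.length : Int)) - ones.length = 0 := by omega
  rw [hz, List.drop_zero] at h2
  simp only [if_pos trivial] at h2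
  rw [h2]
  have := goA_posOnes0 n' 0
  simp only [pow_zero, Nat.mul_one] at this
  exact this

lemma alt_eq_fN (n' : Nat) : problem_169_alt (n' : Int) = fN n' := by
  unfold problem_169_alt
  have hlt : n' < 2 ^ PySem.Int.bitLength (n' : Int) := by
    have := PySem.Int.lt_two_pow_bitLength (n' : Int)
    simpa using this
  have h0 : n' / 2 ^ PySem.Int.bitLength (n' : Int) = 0 := Nat.div_eq_of_lt hlt
  have h := loopB_eq n' (PySem.Int.bitLength (n' : Int))
  rw [h0, fN_zero, show fP 0 = 0 by simp [fP]] at h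
  rw [h]

-- ===== VERDICT (by name: the statement is the Claim_ definition above) =====
theorem problem_169_spec : Claim_equal_problem_169 := by
  intro n _ hpre
  unfold Spec_problem_169
  have h : n = ((n.toNat : Nat) : Int) := by
    unfold Pre_problem_169 at hpre; omega
  rw [h, a_eq_fN, alt_eq_fN]
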